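-- pv_equiv track=rewrite | github.com/Jo-Lam/ErrorProfiler | errorprofiler.py | error_half_category
-- ===== SOURCE A (Python) =====
-- def error_half_category(positions, strlen):
--     """Categorize error positions as 'first_half', 'second_half', or 'both'."""
--     if not positions: return "none"
--     half = strlen / 2
--     in_first = any(p < half for p in positions)
--     in_second = any(p >= half for p in positions)
--     if in_first and in_second:
--         return "both"
--     elif in_first:
--         return "first_half"
--     elif in_second:
--         return "second_half"
--     else:
--         return "none"
-- ===== SOURCE B (Python) =====
-- def error_half_category(positions, strlen):
--     """Categorize error positions as 'first_half', 'second_half', or 'both'."""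
--     cat = "none"
--     for p in positions:
--         c = "first_half" if p < strlen / 2 else "second_half"
--         if cat == "none":
--             cat = c
--         elif cat != c:
--             return "both"
--     return cat
-- ===== Notes on version B (the rewrite author's own statement) =====
-- stated objective: alternative
-- what changed: Replaces the two whole-list any() scans plus the four-way flag cascade with a single-pass state machine: each position is mapped to its own category and merged into an accumulator, returning 'both' early the moment two different categories are seen.
import Mathlib
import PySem

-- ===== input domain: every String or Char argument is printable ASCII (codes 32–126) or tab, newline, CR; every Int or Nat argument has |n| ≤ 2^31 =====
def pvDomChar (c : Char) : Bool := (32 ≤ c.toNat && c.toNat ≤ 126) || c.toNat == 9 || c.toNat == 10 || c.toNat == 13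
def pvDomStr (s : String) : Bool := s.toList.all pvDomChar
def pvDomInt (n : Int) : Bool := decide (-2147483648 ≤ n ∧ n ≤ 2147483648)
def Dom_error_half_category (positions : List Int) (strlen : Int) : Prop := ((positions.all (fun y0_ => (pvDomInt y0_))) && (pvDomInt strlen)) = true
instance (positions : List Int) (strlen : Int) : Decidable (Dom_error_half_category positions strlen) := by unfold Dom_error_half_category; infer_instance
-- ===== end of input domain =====

-- B replaces A's two any() scans and flag cascade with a single-pass state machine that merges
-- per-element categories and returns "both" early (objective: alternative decomposition).
-- Python's 'p < strlen/2' uses float division; on the |int| ≤ 2^31 domain strlen/2 is an exact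
-- dyadic float and the comparison is exact, so both ports render it as the integer comparison 2*p < strlen.

-- ===== PORT A =====
def error_half_category (positions : List Int) (strlen : Int) : String :=
  if positions = [] then "none"
  else
    let in_first := positions.any (fun p => decide (2 * p < strlen))
    let in_second := positions.any (fun p => decide (2 * p ≥ strlen))
    if in_first && in_second then "both"
    else if in_first then "first_half"
    else if in_second then "second_half"
    else "none"

-- ===== PORT B =====
-- the for-loop with early return, as structural recursion over the list with the accumulator 'cat'
def ehcLoop (cat : String) (positions : List Int) (strlen : Int) : String :=
  match positions with
  | [] => cat
  | p :: t =>
    let c := if 2 * p < strlen then "first_half" else "second_half"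
    if cat == "none" then ehcLoop c t strlen
    else if cat != c then "both"
    else ehcLoop cat t strlen

def error_half_category_alt (positions : List Int) (strlen : Int) : String :=
  ehcLoop "none" positions strlen

-- ===== PRECONDITION & SPEC =====
def Spec_error_half_category (positions : List Int) (strlen : Int) (out : String) : Prop := out = error_half_category_alt positions strlen
instance (positions : List Int) (strlen : Int) (out : String) : Decidable (Spec_error_half_category positions strlen out) := by unfold Spec_error_half_category; infer_instance

-- ===== CLAIM (what is proved, stated in full; the proofs are below) =====
def Claim_equal_error_half_category : Prop := ∀ (positions : List Int) (strlen : Int), Dom_error_half_category positions strlen → Spec_error_half_category positions strlen (error_half_category positions strlen)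

-- ===== LEMMAS AND PROOFS =====

theorem ehcLoop_first (t : List Int) (s : Int) :
    ehcLoop "first_half" t s =
      (if t.any (fun p => decide (2 * p ≥ s)) then "both" else "first_half") := by
  induction t with
  | nil => simp [ehcLoop]
  | cons a t ih =>
      by_cases h : 2 * a < s
      · have hn : ¬ s ≤ 2 * a := by omega
        simp [ehcLoop, h, ih, hn]
      · have hy : s ≤ 2 * a := by omega
        simp [ehcLoop, h, hy]

theorem ehcLoop_second (t : List Int) (s : Int) :
    ehcLoop "second_half" t s =
      (if t.any (fun p => decide (2 * p < s)) then "both" else "second_half") := by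
  induction t with
  | nil => simp [ehcLoop]
  | cons a t ih =>
      by_cases h : 2 * a < s
      · simp [ehcLoop, h]
      · simp [ehcLoop, h, ih]


-- ===== VERDICT (by name: the statement is the Claim_ definition above) =====
theorem error_half_category_spec : Claim_equal_error_half_category := by
  intro positions strlen _
  unfold Spec_error_half_category error_half_category error_half_category_alt
  cases positions with
  | nil => simp [ehcLoop]
  | cons h t =>
      simp only [if_neg (List.cons_ne_nil h t)]
      by_cases hf : 2 * h < strlen
      · rw [show ehcLoop "none" (h :: t) strlen = ehcLoop "first_half" t strlen by
          simp [ehcLoop, hf]]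
        rw [ehcLoop_first]
        have hany1 : (h :: t).any (fun p => decide (2 * p < strlen)) = true := by
          simp; exact Or.inl hf
        have hhead : ¬ strlen ≤ 2 * h := by omega
        simp [hany1, hhead]
      · rw [show ehcLoop "none" (h :: t) strlen = ehcLoop "second_half" t strlen by
          simp [ehcLoop, hf]]
        rw [ehcLoop_second]
        have hany2 : (h :: t).any (fun p => decide (2 * p ≥ strlen)) = true := by
          simp; exact Or.inl (by omega)
        simp [hany2, hf]
        by_cases h2 : ∃ x ∈ t, 2 * x < strlen
        · simp [h2]
        · simp [h2]
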